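-- pv_equiv track=rewrite | github.com/Herotank1234/AdventOfCode | 2019/q16.py | reverseCumulativeSum
-- ===== SOURCE A (Python) =====
-- def reverseCumulativeSum(currSignal):
--   nextSignal = []
--   for i in range(0, len(currSignal)):
--     if i == 0:
--       nextSignal.append(str(currSignal[len(currSignal) - 1 - i]))
--     else:
--       nextSignal.append(str((int(currSignal[len(currSignal) - 1 - i]) + int(nextSignal[i - 1])) % 10))
--   return nextSignal[::-1]
-- ===== SOURCE B (Python) =====
-- def reverseCumulativeSum(currSignal):
--   if len(currSignal) <= 1:
--     return [str(d) for d in currSignal]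
--   vals = [int(d) for d in currSignal]
--   total = sum(vals)
--   prefix = []
--   acc = 0
--   for v in vals:
--     prefix.append(acc)
--     acc += v
--   out = [str((total - prefix[j]) % 10) for j in range(len(currSignal) - 1)]
--   out.append(str(currSignal[-1]))
--   return out
-- ===== Notes on version B (the rewrite author's own statement) =====
-- stated objective: alternative
-- what changed: Replaces A's reverse accumulation (building the output back-to-front with each entry parsed from the previous output string) with a forward total/prefix-sum decomposition: one pass computes all values, their total and a prefix-sum array, and a second pass emits str((total - prefix[j]) % 10) per position, with the final position kept verbatim.
import Mathlib
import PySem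

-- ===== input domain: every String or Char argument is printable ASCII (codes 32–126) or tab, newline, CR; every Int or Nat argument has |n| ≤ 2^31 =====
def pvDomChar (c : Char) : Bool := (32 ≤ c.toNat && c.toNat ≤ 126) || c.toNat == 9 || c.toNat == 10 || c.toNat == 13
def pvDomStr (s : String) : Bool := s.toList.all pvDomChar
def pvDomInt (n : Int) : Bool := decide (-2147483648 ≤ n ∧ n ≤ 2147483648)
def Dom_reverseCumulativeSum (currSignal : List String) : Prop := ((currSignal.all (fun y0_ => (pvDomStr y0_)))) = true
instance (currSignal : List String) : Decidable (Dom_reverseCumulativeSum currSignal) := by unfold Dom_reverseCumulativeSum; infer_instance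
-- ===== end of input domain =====

-- B replaces A's reverse running-sum accumulation by a forward total/prefix-sum two-pass
-- decomposition (objective: alternative); equal return value on every input where A returns.

-- ===== PORT A =====
def reverseCumulativeSum (currSignal : List String) : List String :=
  let nextSignal := (PySem.List.pyRange 0 (currSignal.length : Int) 1).foldl (fun ns i =>
    if i = 0 then
      ns ++ [((PySem.List.pyGet? currSignal ((currSignal.length : Int) - 1 - i)).getD "")]
    else
      ns ++ [PySem.Int.toStr (PySem.Int.mod
        (((PySem.List.pyGet? currSignal ((currSignal.length : Int) - 1 - i)).bind PySem.Int.ofStr?).getD 0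
         + ((PySem.List.pyGet? ns (i - 1)).bind PySem.Int.ofStr?).getD 0) 10)]) []
  (PySem.List.slice? nextSignal none none (-1)).getD []

-- ===== PORT B =====
def reverseCumulativeSum_alt (currSignal : List String) : List String :=
  if currSignal.length ≤ 1 then currSignal.map (fun d => d)
  else
    let vals := currSignal.map (fun d => (PySem.Int.ofStr? d).getD 0)
    let total := vals.sum
    let pfx := (vals.foldl (fun (st : List Int × Int) v => (st.1 ++ [st.2], st.2 + v)) ([], 0)).1
    let out := (PySem.List.pyRange 0 ((currSignal.length : Int) - 1) 1).map
      (fun j => PySem.Int.toStr (PySem.Int.mod (total - (PySem.List.pyGet? pfx j).getD 0) 10))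
    out ++ [((PySem.List.pyGet? currSignal (-1)).getD "")]

-- ===== PRECONDITION & SPEC =====
-- Pre_ excludes exactly the inputs on which the Python A raises ValueError: with at least two
-- elements, every element is parsed by int() during the loop.
def Pre_reverseCumulativeSum (currSignal : List String) : Prop :=
  2 ≤ currSignal.length → ∀ s ∈ currSignal, (PySem.Int.ofStr? s).isSome = true
instance (currSignal : List String) : Decidable (Pre_reverseCumulativeSum currSignal) := by
  unfold Pre_reverseCumulativeSum; infer_instance
def pvWitness_reverseCumulativeSum : List String := ["3", "1", "4", "5"]
def Spec_reverseCumulativeSum (currSignal : List String) (out : List String) : Prop := out = reverseCumulativeSum_alt currSignal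
instance (currSignal : List String) (out : List String) : Decidable (Spec_reverseCumulativeSum currSignal out) := by unfold Spec_reverseCumulativeSum; infer_instance

-- ===== CLAIM (what is proved, stated in full; the proofs are below) =====
def Claim_equal_reverseCumulativeSum : Prop := ∀ (currSignal : List String), Dom_reverseCumulativeSum currSignal → Pre_reverseCumulativeSum currSignal → Spec_reverseCumulativeSum currSignal (reverseCumulativeSum currSignal)

-- ===== LEMMAS AND PROOFS =====
def pvVal (s : String) : Int := (PySem.Int.ofStr? s).getD 0
def pvSfx (xs : List String) (j : Nat) : Int := ((xs.drop j).map pvVal).sum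
def pvRowA (xs : List String) (i : Nat) : String :=
  if i = 0 then xs.getD (xs.length - 1) ""
  else PySem.Int.toStr (PySem.Int.mod (pvSfx xs (xs.length - 1 - i)) 10)
theorem pv_roundtrip_digit (n : Int) (h0 : 0 ≤ n) (h1 : n < 10) :
    PySem.Int.ofStr? (PySem.Int.toStr n) = some n := by
  interval_cases n <;> decide
theorem pvVal_toStr_mod10 (a : Int) :
    (PySem.Int.ofStr? (PySem.Int.toStr (PySem.Int.mod a 10))).getD 0 = PySem.Int.mod a 10 := by
  rw [pv_roundtrip_digit _ (PySem.Int.mod_nonneg a (by norm_num)) (PySem.Int.mod_lt a (by norm_num))]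
  rfl
theorem pvSfx_step (xs : List String) (j : Nat) (h : j < xs.length) :
    pvSfx xs j = pvVal xs[j] + pvSfx xs (j + 1) := by
  unfold pvSfx
  rw [List.drop_eq_getElem_cons h, List.map_cons, List.sum_cons]
theorem pvMod_add_mod (a b : Int) :
    PySem.Int.mod (a + PySem.Int.mod b 10) 10 = PySem.Int.mod (a + b) 10 := by
  rw [PySem.Int.mod_eq_emod_of_pos (by norm_num : (0:Int) < 10),
      PySem.Int.mod_eq_emod_of_pos (by norm_num : (0:Int) < 10),
      PySem.Int.mod_eq_emod_of_pos (by norm_num : (0:Int) < 10)]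
  omega

theorem pvA_fold (xs : List String) :
    ∀ k : Nat, k ≤ xs.length →
      (PySem.List.pyRange 0 (k : Int) 1).foldl (fun ns i =>
        if i = 0 then
          ns ++ [((PySem.List.pyGet? xs ((xs.length : Int) - 1 - i)).getD "")]
        else
          ns ++ [PySem.Int.toStr (PySem.Int.mod
            (((PySem.List.pyGet? xs ((xs.length : Int) - 1 - i)).bind PySem.Int.ofStr?).getD 0
             + ((PySem.List.pyGet? ns (i - 1)).bind PySem.Int.ofStr?).getD 0) 10)]) []
      = (List.range k).map (pvRowA xs) := by
  intro k
  induction k with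
  | zero => intro _; simp [PySem.List.pyRange_one_eq_nil]
  | succ m ih =>
    intro hm
    have h1 : ((m + 1 : Nat) : Int) = (m : Int) + 1 := by omega
    rw [h1, PySem.List.pyRange_one_succ_right (by positivity), List.foldl_append,
        ih (by omega), List.foldl_cons, List.foldl_nil]
    rw [List.range_succ, List.map_append]
    by_cases hm0 : m = 0
    · subst hm0
      have hx : ((xs.length : Int) - 1 - 0) = ((xs.length - 1 : Nat) : Int) := by omega
      simp only [Nat.cast_zero]
      simp only [hx, PySem.List.pyGet?_natCast]
      have hlt : xs.length - 1 < xs.length := by omega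
      rw [List.getElem?_eq_getElem hlt]
      simp [pvRowA, List.getD_eq_getElem?_getD, List.getElem?_eq_getElem hlt]
    · have hm0' : ((m : Int)) ≠ 0 := by exact_mod_cast hm0
      rw [if_neg hm0']
      -- element fetch: n - 1 - m = (n - 1 - m : Nat)
      have hx : ((xs.length : Int) - 1 - (m : Int)) = ((xs.length - 1 - m : Nat) : Int) := by
        omega
      have hx2 : ((m : Int) - 1) = ((m - 1 : Nat) : Int) := by omega
      rw [hx, hx2, PySem.List.pyGet?_natCast, PySem.List.pyGet?_natCast]
      have hlt : xs.length - 1 - m < xs.length := by omega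
      have hltm : m - 1 < m := by omega
      rw [List.getElem?_eq_getElem hlt,
          List.getElem?_map, List.getElem?_range hltm]
      simp only [Option.bind_some, Option.map_some]
      -- now the previous-row value
      rcases Nat.exists_eq_succ_of_ne_zero hm0 with ⟨p, rfl⟩
      simp only [Nat.succ_sub_one]
      by_cases hp0 : p = 0
      · subst hp0
        -- prev row is the raw last element
        have hl : xs.length - 1 < xs.length := by omega
        have hprev : pvRowA xs 0 = xs[xs.length - 1] := by
          simp [pvRowA, List.getD_eq_getElem?_getD, List.getElem?_eq_getElem hl]
        rw [hprev]
        unfold pvRowA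
        simp only [List.map_cons, List.map_nil]
        rw [if_neg (by omega : ¬ Nat.succ 0 = 0)]
        have e1 : pvSfx xs (xs.length - 1 - Nat.succ 0) = pvVal xs[xs.length - 1 - Nat.succ 0] + pvSfx xs (xs.length - 1) := by
          rw [pvSfx_step xs (xs.length - 1 - Nat.succ 0) (by omega)]
          congr 2
          omega
        have e0 : pvSfx xs (xs.length - 1 + 1) = 0 := by
          unfold pvSfx
          have h : xs.length - 1 + 1 = xs.length := by omega
          simp [h]
        rw [e1, pvSfx_step xs (xs.length - 1) hl, e0, add_zero]
        rfl
      · -- prev row is a toStr (mod _ 10)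
        have hprev : pvRowA xs p = PySem.Int.toStr (PySem.Int.mod (pvSfx xs (xs.length - 1 - p)) 10) := by
          unfold pvRowA
          rw [if_neg hp0]
        rw [hprev, pvVal_toStr_mod10, pvMod_add_mod]
        unfold pvRowA
        simp only [List.map_cons, List.map_nil]
        rw [if_neg (by omega : ¬ p.succ = 0)]
        have e1 : pvSfx xs (xs.length - 1 - p.succ) = pvVal xs[xs.length - 1 - p.succ] + pvSfx xs (xs.length - 1 - p) := by
          rw [pvSfx_step xs (xs.length - 1 - p.succ) (by omega)]
          congr 2
          omega
        rw [e1]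
        rfl

theorem pvPrefix_fold (ys : List Int) :
    ∀ (acc : List Int) (s : Int),
      (ys.foldl (fun (st : List Int × Int) v => (st.1 ++ [st.2], st.2 + v)) (acc, s)).1
        = acc ++ (List.range ys.length).map (fun j => s + (ys.take j).sum) := by
  induction ys with
  | nil => intro acc s; simp
  | cons y t ih =>
    intro acc s
    rw [List.foldl_cons, ih]
    simp [List.range_succ_eq_map, Function.comp_def, add_assoc]

theorem pvPfx_list (ys : List Int) :
    (ys.foldl (fun (st : List Int × Int) v => (st.1 ++ [st.2], st.2 + v)) (([] : List Int), (0:Int))).1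
      = (List.range ys.length).map (fun j => (ys.take j).sum) := by
  rw [pvPrefix_fold]
  simp

theorem pvA_closed (xs : List String) :
    reverseCumulativeSum xs = ((List.range xs.length).map (pvRowA xs)).reverse := by
  show (PySem.List.slice? _ none none (-1)).getD [] = _
  rw [pvA_fold xs xs.length le_rfl, PySem.List.slice?_none_none_neg_one]
  rfl

theorem pv_main (xs : List String) : reverseCumulativeSum xs = reverseCumulativeSum_alt xs := by
  rw [pvA_closed]
  by_cases hn : xs.length ≤ 1
  · unfold reverseCumulativeSum_alt
    rw [if_pos hn]
    rcases xs with _ | ⟨a, _ | ⟨b, t⟩⟩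
    · rfl
    · simp [pvRowA]
    · simp at hn
  · unfold reverseCumulativeSum_alt
    rw [if_neg hn]
    have hn2 : 2 ≤ xs.length := by omega
    simp only []
    rw [pvPfx_list]
    apply List.ext_getElem
    · simp only [List.length_reverse, List.length_map, List.length_range,
        List.length_append, PySem.List.length_pyRange_one, List.length_cons, List.length_nil]
      omega
    · intro j hj hj2
      rw [List.getElem_reverse]
      simp only [List.length_map, List.length_range] at hj ⊢
      rw [List.getElem_map, List.getElem_range]
      simp only [List.length_reverse, List.length_map, List.length_range] at hj
      by_cases hjl : j < xs.length - 1
      · -- inside out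
        rw [List.getElem_append_left (by
          simp only [List.length_map, PySem.List.length_pyRange_one]; omega)]
        rw [List.getElem_map, PySem.List.getElem_pyRange_one]
        -- rowA (n-1-j) vs g (0 + j)
        have hne : ¬ (xs.length - 1 - j = 0) := by omega
        unfold pvRowA
        rw [if_neg hne]
        have hidx : xs.length - 1 - (xs.length - 1 - j) = j := by omega
        rw [hidx]
        congr 1
        -- toStr args
        have hcast : ((0:Int) + (j:Int)) = ((j:Nat) : Int) := by omega
        rw [hcast, PySem.List.pyGet?_natCast]
        have hjr : j < ((List.range xs.length).map
            (fun j => (((xs.map (fun d => (PySem.Int.ofStr? d).getD 0)).take j)).sum)).length := by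
          simp; omega
        rw [List.getElem?_eq_getElem hjr, Option.getD_some, List.getElem_map,
            List.getElem_range]
        congr 1
        have hsplit := List.sum_take_add_sum_drop (xs.map (fun d => (PySem.Int.ofStr? d).getD 0)) j
        have hdrop : ((xs.map (fun d => (PySem.Int.ofStr? d).getD 0)).drop j) = (xs.drop j).map pvVal := by
          rw [List.map_drop]
          rfl
        rw [hdrop] at hsplit
        unfold pvSfx
        omega
      · -- last position: j = xs.length - 1
        have hj1 : j = xs.length - 1 := by omega
        subst hj1
        rw [List.getElem_append_right (by
          simp only [List.length_map, PySem.List.length_pyRange_one]; omega)]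
        rw [List.getElem_singleton, PySem.List.pyGet?_neg_one]
        unfold pvRowA
        rw [if_pos (by omega : xs.length - 1 - (xs.length - 1) = 0)]
        have hnn : xs ≠ [] := by intro h; subst h; simp at hn2
        rw [List.getLast?_eq_some_getLast hnn, Option.getD_some, List.getLast_eq_getElem]
        simp [List.getD_eq_getElem?_getD, List.getElem?_eq_getElem (show xs.length - 1 < xs.length by omega)]

-- ===== VERDICT (by name: the statement is the Claim_ definition above) =====
theorem reverseCumulativeSum_spec : Claim_equal_reverseCumulativeSum := by
  intro currSignal _ _
  unfold Spec_reverseCumulativeSum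
  exact pv_main currSignal
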